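-- pv_equiv track=rewrite | github.com/jackrosenthal/fun | fmtmap.py | get_single_symbol_map
-- ===== SOURCE A (Python) =====
-- import string
--
-- mod_values = {
--     'plain': 0,
--     'shift': 1,
--     'altgr': 2,
--     'control': 4,
--     'alt': 8,
--     'shiftl': 16,
--     'shiftr': 32,
--     'ctrll': 64,
-- }
--
-- def modlist(idx):
--     mods = []
--     mod_val_rev = sorted(mod_values.items(), key=lambda t: -t[1])
--     # plain
--     mod_val_rev.pop()
--     for mod_name, mod_val in mod_val_rev:
--         if idx >= mod_val:
--             idx -= mod_val
--             mods.append(mod_name)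
--     return mods
--
-- def get_single_symbol_map(keysym):
--     if keysym in string.ascii_letters:
--         symbols = []
--         for i in range(128):
--             mods = modlist(i)
--             if 'control' in mods and 'alt' in mods:
--                 symbols.append(f"Meta_Control_{keysym.lower()}")
--                 continue
--             if 'control' in mods:
--                 symbols.append(f"Control_{keysym.lower()}")
--                 continue
--             newsym = keysym.swapcase() if "shift" in mods else keysym
--             if "alt" in mods:
--                 symbols.append(f"Meta_{newsym}")
--                 continue
--             symbols.append(newsym)
--         return symbols
--     return [keysym] * 128
-- ===== SOURCE B (Python) =====
-- import string
--
-- def get_single_symbol_map(keysym):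
--     if keysym in string.ascii_letters:
--         low = keysym.lower()
--         sw = keysym.swapcase()
--         # the result for index i depends only on i % 16 (bits 16/32/64 are the
--         # shiftl/shiftr/ctrll modifiers, which the branches never test), so build
--         # the 16-entry base block once and tile it 8 times
--         block = ([keysym, sw] * 2
--                  + ["Control_" + low] * 4
--                  + ["Meta_" + keysym, "Meta_" + sw] * 2
--                  + ["Meta_Control_" + low] * 4)
--         return block * 8
--     return [keysym] * 128
-- ===== Notes on version B (the rewrite author's own statement) =====
-- stated objective: simpler
-- what changed: Replaces the 128-iteration loop with its modlist sorted()/pop() greedy decomposition and membership branches by a table construction: the 16-entry base block (the output only depends on i mod 16) is built once by list repetition/concatenation and tiled 8 times; no per-index loop or modifier tests remain.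
import Mathlib
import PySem

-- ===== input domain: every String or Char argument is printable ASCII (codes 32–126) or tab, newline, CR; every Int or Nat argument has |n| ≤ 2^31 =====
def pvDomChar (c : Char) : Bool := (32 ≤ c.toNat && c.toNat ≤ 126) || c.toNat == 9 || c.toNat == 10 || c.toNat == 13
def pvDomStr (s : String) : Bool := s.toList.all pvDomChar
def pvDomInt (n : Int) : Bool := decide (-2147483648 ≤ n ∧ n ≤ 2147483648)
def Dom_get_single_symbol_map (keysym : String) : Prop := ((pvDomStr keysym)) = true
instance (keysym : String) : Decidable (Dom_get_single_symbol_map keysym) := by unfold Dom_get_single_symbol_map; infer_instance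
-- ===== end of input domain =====

-- B replaces the per-index loop with modlist's greedy decomposition by building the
-- 16-entry base block (the output depends only on i mod 16) once and tiling it 8 times.

-- shared context: string.ascii_letters
def pvAsciiLetters : String := "abcdefghijklmnopqrstuvwxyzABCDEFGHIJKLMNOPQRSTUVWXYZ"

-- str.swapcase ported by hand, character by character (exact on the ASCII domain)
def pySwapcaseChar (c : Char) : Char :=
  if PySem.Chars.isupper c then PySem.Chars.lowerChar c
  else if PySem.Chars.islower c then PySem.Chars.upperChar c
  else c

def pySwapcase (s : String) : String := String.ofList (s.toList.map pySwapcaseChar)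

-- ===== PORT A =====
def pvModValues : PySem.Dict String Int :=
  PySem.Dict.ofList
    [("plain", 0), ("shift", 1), ("altgr", 2), ("control", 4),
     ("alt", 8), ("shiftl", 16), ("shiftr", 32), ("ctrll", 64)]

def modlist (idx : Int) : List String :=
  let mods : List String := []
  let modValRev := PySem.List.sorted (pvModValues.items) (fun t => -t.2)
  -- mod_val_rev.pop()  (drops the last element, 'plain'; the list is nonempty so pop? succeeds)
  match PySem.List.pop? modValRev with
  | none => mods
  | some (_, modValRev) =>
    (modValRev.foldl
      (fun (st : Int × List String) p =>
        if p.2 ≤ st.1 then (st.1 - p.2, st.2 ++ [p.1]) else st)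
      (idx, mods)).2

def get_single_symbol_map (keysym : String) : List String :=
  if PySem.Str.isIn keysym pvAsciiLetters then
    (PySem.List.pyRange 0 128 1).foldl
      (fun symbols i =>
        let mods := modlist i
        if mods.contains "control" && mods.contains "alt" then
          symbols ++ ["Meta_Control_" ++ PySem.Str.lower keysym]
        else if mods.contains "control" then
          symbols ++ ["Control_" ++ PySem.Str.lower keysym]
        else
          let newsym := if mods.contains "shift" then pySwapcase keysym else keysym
          if mods.contains "alt" then symbols ++ ["Meta_" ++ newsym]
          else symbols ++ [newsym])
      []
  else PySem.List.pyRepeat [keysym] 128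

-- ===== PORT B =====
def get_single_symbol_map_alt (keysym : String) : List String :=
  if PySem.Str.isIn keysym pvAsciiLetters then
    let low := PySem.Str.lower keysym
    let sw := pySwapcase keysym
    let block :=
      PySem.List.pyRepeat [keysym, sw] 2 ++
      PySem.List.pyRepeat ["Control_" ++ low] 4 ++
      PySem.List.pyRepeat ["Meta_" ++ keysym, "Meta_" ++ sw] 2 ++
      PySem.List.pyRepeat ["Meta_Control_" ++ low] 4
    PySem.List.pyRepeat block 8
  else PySem.List.pyRepeat [keysym] 128

-- ===== PRECONDITION & SPEC =====
def Spec_get_single_symbol_map (keysym : String) (out : List String) : Prop := out = get_single_symbol_map_alt keysym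
instance (keysym : String) (out : List String) : Decidable (Spec_get_single_symbol_map keysym out) := by unfold Spec_get_single_symbol_map; infer_instance

-- ===== CLAIM =====
def Claim_equal_get_single_symbol_map : Prop := ∀ (keysym : String), Dom_get_single_symbol_map keysym → Spec_get_single_symbol_map keysym (get_single_symbol_map keysym)

-- ===== LEMMAS AND PROOFS =====

-- a code 0..5 naming which of the six possible entry strings index i produces
def pvPick (keysym : String) (c : Int) : String :=
  if c = 0 then keysym
  else if c = 1 then pySwapcase keysym
  else if c = 2 then "Meta_" ++ keysym
  else if c = 3 then "Meta_" ++ pySwapcase keysym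
  else if c = 4 then "Meta_Control_" ++ PySem.Str.lower keysym
  else "Control_" ++ PySem.Str.lower keysym

def pvCode (i : Int) : Int :=
  let mods := modlist i
  if mods.contains "control" && mods.contains "alt" then 4
  else if mods.contains "control" then 5
  else (if mods.contains "shift" then 1 else 0) + (if mods.contains "alt" then 2 else 0)

-- A's fold step appends exactly the entry named by pvCode
lemma pvStep (k : String) (s : List String) (i : Int) :
    (let mods := modlist i
     if mods.contains "control" && mods.contains "alt" then
       s ++ ["Meta_Control_" ++ PySem.Str.lower k]
     else if mods.contains "control" then
       s ++ ["Control_" ++ PySem.Str.lower k]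
     else
       let newsym := if mods.contains "shift" then pySwapcase k else k
       if mods.contains "alt" then s ++ ["Meta_" ++ newsym]
       else s ++ [newsym]) = s ++ [pvPick k (pvCode i)] := by
  unfold pvPick pvCode
  by_cases hc : "control" ∈ modlist i <;>
    by_cases ha : "alt" ∈ modlist i <;>
      by_cases hs : "shift" ∈ modlist i <;>
        simp [hc, ha, hs]

-- the 128 codes, evaluated once by the kernel: the 16-block repeated 8 times
set_option maxRecDepth 20000 in
lemma pvCodes : (PySem.List.pyRange 0 128 1).map pvCode = [0, 1, 0, 1, 5, 5, 5, 5, 2, 3, 2, 3, 4, 4, 4, 4, 0, 1, 0, 1, 5, 5, 5, 5, 2, 3, 2, 3, 4, 4, 4, 4, 0, 1, 0, 1, 5, 5, 5, 5, 2, 3, 2, 3, 4, 4, 4, 4, 0, 1, 0, 1, 5, 5, 5, 5, 2, 3, 2, 3, 4, 4, 4, 4, 0, 1, 0, 1, 5, 5, 5, 5, 2, 3, 2, 3, 4, 4, 4, 4, 0, 1, 0, 1, 5, 5, 5, 5, 2, 3, 2, 3, 4, 4, 4, 4, 0, 1, 0, 1, 5, 5, 5, 5, 2, 3, 2, 3,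 4, 4, 4, 4, 0, 1, 0, 1, 5, 5, 5, 5, 2, 3, 2, 3, 4, 4, 4, 4] := by decide

-- ===== VERDICT =====
set_option maxRecDepth 20000 in
theorem get_single_symbol_map_spec : Claim_equal_get_single_symbol_map := by
  intro keysym _
  unfold Spec_get_single_symbol_map get_single_symbol_map get_single_symbol_map_alt
  by_cases h : PySem.Str.isIn keysym pvAsciiLetters
  · simp only [h, if_true]
    rw [PySem.List.foldl_congr_mem _ _ (fun s i => s ++ [pvPick keysym (pvCode i)]) _
        (fun s i _ => pvStep keysym s i),
      PySem.List.foldl_append_singleton_eq_map, List.nil_append,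
      show (fun i => pvPick keysym (pvCode i)) = pvPick keysym ∘ pvCode from rfl,
      ← List.map_map, pvCodes]
    simp [pvPick, PySem.List.pyRepeat]
  · simp only [h, Bool.false_eq_true, if_false]
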